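-- pv_equiv track=rewrite | github.com/Mansal27/crawle_python | robots.py | check_robots_txt
-- ===== SOURCE A (Python) =====
-- def check_robots_txt(robots_txt, path, user_agent):
--     lines = robots_txt.splitlines()
--     user_agent_line = False
--     for line in lines:
--         line = line.strip()
--         if line.startswith("User-agent:"):
--             user_agent_line = line.split(":")[1].strip() == user_agent or line.split(":")[1].strip() == "*"
--         elif user_agent_line and line.startswith("Disallow:"):
--             disallow_path = line.split(":")[1].strip()
--             if path.startswith(disallow_path):
--                 return False
--     return True
-- ===== SOURCE B (Python) =====
-- def _last_agent(seen):
--     """Field of the most recent 'User-agent:' line in seen (most recent first), or None."""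
--     for l in seen:
--         if l.startswith("User-agent:"):
--             return l.split(":")[1].strip()
--     return None
--
-- def _matches(agent, user_agent):
--     return agent is not None and (agent == user_agent or agent == "*")
--
-- def check_robots_txt(robots_txt, path, user_agent):
--     seen = []  # previously processed stripped lines, most recent first
--     for raw in robots_txt.splitlines():
--         line = raw.strip()
--         if line.startswith("Disallow:") and _matches(_last_agent(seen), user_agent):
--             if path.startswith(line.split(":")[1].strip()):
--                 return False
--         seen = [line] + seen
--     return True
-- ===== Notes on version B (the rewrite author's own statement) =====
-- stated objective: alternative
-- what changed: B keeps no boolean flag: it retains the history of processed lines (most recent first) and, at each Disallow line, re-derives the governing agent by searching that history for the nearest preceding User-agent line.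
import Mathlib
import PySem

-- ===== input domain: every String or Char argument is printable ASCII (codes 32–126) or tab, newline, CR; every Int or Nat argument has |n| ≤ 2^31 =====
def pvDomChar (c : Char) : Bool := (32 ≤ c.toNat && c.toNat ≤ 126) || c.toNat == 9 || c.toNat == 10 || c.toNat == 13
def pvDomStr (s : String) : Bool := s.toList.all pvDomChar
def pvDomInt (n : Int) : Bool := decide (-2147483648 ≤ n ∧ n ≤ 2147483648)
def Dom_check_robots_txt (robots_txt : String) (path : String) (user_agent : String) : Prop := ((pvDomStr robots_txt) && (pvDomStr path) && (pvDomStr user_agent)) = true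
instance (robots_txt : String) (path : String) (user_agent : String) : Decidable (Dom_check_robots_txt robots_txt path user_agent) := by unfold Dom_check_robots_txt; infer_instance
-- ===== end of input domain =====

-- B keeps no boolean flag: it retains the history of processed lines and re-derives the governing
-- agent at each Disallow line by searching that history (alternative decomposition, same result).

-- ===== PORT A =====
-- line.split(":")[1].strip(); the [1] index always exists under the startswith guards, .getD "" is never used there
def pvFieldA (line : String) : String :=
  PySem.Str.strip ((PySem.List.pyGet? ((PySem.Str.split? line ":").getD []) 1).getD "")

-- the for-loop with early return, state = user_agent_line flag
def pvLoopA (path : String) (user_agent : String) : List String → Bool → Bool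
  | [], _ => true
  | l :: rest, flag =>
    let line := PySem.Str.strip l
    if PySem.Str.startswith line "User-agent:" then
      pvLoopA path user_agent rest
        (pvFieldA line == user_agent || pvFieldA line == "*")
    else if flag && PySem.Str.startswith line "Disallow:" then
      let disallow_path := pvFieldA line
      if PySem.Str.startswith path disallow_path then false
      else pvLoopA path user_agent rest flag
    else pvLoopA path user_agent rest flag

def check_robots_txt (robots_txt : String) (path : String) (user_agent : String) : Bool :=
  pvLoopA path user_agent (PySem.Str.splitlines robots_txt) false

-- ===== PORT B =====
def pvFieldB (line : String) : String :=
  PySem.Str.strip ((PySem.List.pyGet? ((PySem.Str.split? line ":").getD []) 1).getD "")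

-- _last_agent: field of the most recent 'User-agent:' line in the history, or None
def pvLastAgent : List String → Option String
  | [] => none
  | l :: rest =>
    if PySem.Str.startswith l "User-agent:" then some (pvFieldB l)
    else pvLastAgent rest

-- _matches
def pvMatches (agent : Option String) (user_agent : String) : Bool :=
  match agent with
  | none => false
  | some a => a == user_agent || a == "*"

-- the for-loop of B: state = history of stripped lines, most recent first
def pvLoopB (path : String) (user_agent : String) : List String → List String → Bool
  | _, [] => true
  | seen, raw :: rest =>
    let line := PySem.Str.strip raw
    if PySem.Str.startswith line "Disallow:" && pvMatches (pvLastAgent seen) user_agent then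
      if PySem.Str.startswith path (pvFieldB line) then false
      else pvLoopB path user_agent (line :: seen) rest
    else pvLoopB path user_agent (line :: seen) rest

def check_robots_txt_alt (robots_txt : String) (path : String) (user_agent : String) : Bool :=
  pvLoopB path user_agent [] (PySem.Str.splitlines robots_txt)

-- ===== PRECONDITION & SPEC =====
def Spec_check_robots_txt (robots_txt : String) (path : String) (user_agent : String) (out : Bool) : Prop := out = check_robots_txt_alt robots_txt path user_agent
instance (robots_txt : String) (path : String) (user_agent : String) (out : Bool) : Decidable (Spec_check_robots_txt robots_txt path user_agent out) := by unfold Spec_check_robots_txt; infer_instance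

-- ===== CLAIM (what is proved, stated in full; the proofs are below) =====
def Claim_equal_check_robots_txt : Prop := ∀ (robots_txt : String) (path : String) (user_agent : String), Dom_check_robots_txt robots_txt path user_agent → Spec_check_robots_txt robots_txt path user_agent (check_robots_txt robots_txt path user_agent)

-- ===== LEMMAS AND PROOFS =====
-- no line starts with both "User-agent:" and "Disallow:"
theorem pv_not_both (l : String) (h1 : PySem.Str.startswith l "User-agent:" = true) :
    PySem.Str.startswith l "Disallow:" = false := by
  by_contra h
  have h2 : PySem.Str.startswith l "Disallow:" = true := by
    cases hb : PySem.Str.startswith l "Disallow:" <;> simp_all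
  rw [PySem.Str.startswith_eq, PySem.Chars.startswith_iff] at h1 h2
  obtain ⟨t1, ht1⟩ := h1
  obtain ⟨t2, ht2⟩ := h2
  rw [← ht2] at ht1
  simp at ht1

theorem pvLoop_eq (path user_agent : String) (ls : List String) (seen : List String) (flag : Bool)
    (hinv : pvMatches (pvLastAgent seen) user_agent = flag) :
    pvLoopA path user_agent ls flag = pvLoopB path user_agent seen ls := by
  induction ls generalizing seen flag with
  | nil => simp [pvLoopA, pvLoopB]
  | cons l rest ih =>
    simp only [pvLoopA, pvLoopB]
    have hf : pvFieldB = pvFieldA := rfl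
    have h0 : ¬ (false = true) := by decide
    by_cases hua : PySem.Str.startswith (PySem.Str.strip l) "User-agent:" = true
    · have hdis := pv_not_both _ hua
      rw [if_pos hua, hdis, Bool.false_and, if_neg h0]
      have hlast : pvLastAgent (PySem.Str.strip l :: seen) = some (pvFieldB (PySem.Str.strip l)) := by
        simp only [pvLastAgent]; rw [if_pos hua]
      exact ih _ _ (by simp only [pvMatches, hlast, hf])
    · rw [if_neg hua]
      have hlast : pvLastAgent (PySem.Str.strip l :: seen) = pvLastAgent seen := by
        simp only [pvLastAgent]; rw [if_neg hua]
      have hseen : pvMatches (pvLastAgent (PySem.Str.strip l :: seen)) user_agent = flag := by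
        rw [hlast]; exact hinv
      by_cases hdis : PySem.Str.startswith (PySem.Str.strip l) "Disallow:" = true
      · rw [hdis]
        simp only [Bool.and_true, Bool.true_and, hinv]
        cases flag with
        | false => rw [if_neg h0, if_neg h0]; exact ih _ _ hseen
        | true =>
          rw [if_pos rfl, if_pos rfl, hf]
          by_cases hp : PySem.Str.startswith path (pvFieldA (PySem.Str.strip l)) = true
          · rw [if_pos hp, if_pos hp]
          · rw [if_neg hp, if_neg hp]; exact ih _ _ hseen
      · have hdis' : PySem.Str.startswith (PySem.Str.strip l) "Disallow:" = false := by
          cases hb : PySem.Str.startswith (PySem.Str.strip l) "Disallow:" <;> simp_all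
        rw [hdis']
        simp only [Bool.and_false, Bool.false_and]
        rw [if_neg h0, if_neg h0]
        exact ih _ _ hseen

-- ===== VERDICT (by name: the statement is the Claim_ definition above) =====
theorem check_robots_txt_spec : Claim_equal_check_robots_txt := by
  intro r p u _
  unfold Spec_check_robots_txt check_robots_txt check_robots_txt_alt
  exact pvLoop_eq p u _ [] false rfl
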